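-- pv_equiv track=rewrite | github.com/zmazz/govwatcher-cosmos-vultr | src/ai_adapters.py | _categorize_proposal
-- ===== SOURCE A (Python) =====
-- def _categorize_proposal(title: str, description: str, proposal_type: str) -> str:
--     """Categorize proposal for specialized analysis."""
--     title_lower = title.lower()
--     description_lower = description.lower()
--
--     # Security and upgrade related
--     if any(keyword in title_lower for keyword in ['upgrade', 'security', 'patch', 'fix', 'vulnerability']):
--         return "SECURITY_UPGRADE"
--
--     # Economic and parameter changes
--     if any(keyword in title_lower for keyword in ['parameter', 'inflation', 'fee', 'reward', 'tax', 'burn']):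
--         return "ECONOMIC_PARAMETER"
--
--     # Governance and voting
--     if any(keyword in title_lower for keyword in ['governance', 'voting', 'quorum', 'threshold', 'proposal']):
--         return "GOVERNANCE_CHANGE"
--
--     # Community pool and funding
--     if any(keyword in title_lower for keyword in ['community', 'pool', 'fund', 'grant', 'spend']):
--         return "COMMUNITY_FUNDING"
--
--     # Validator and staking
--     if any(keyword in title_lower for keyword in ['validator', 'staking', 'delegation', 'slash', 'jail']):
--         return "VALIDATOR_STAKING"
--
--     # IBC and interoperability
--     if any(keyword in title_lower for keyword in ['ibc', 'interchain', 'bridge', 'cross-chain']):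
--         return "INTEROPERABILITY"
--
--     # Smart contracts and CosmWasm
--     if any(keyword in title_lower for keyword in ['contract', 'cosmwasm', 'wasm', 'smart']):
--         return "SMART_CONTRACT"
--
--     return "GENERAL_GOVERNANCE"
-- ===== SOURCE B (Python) =====
-- _GROUPS = [
--     ("SECURITY_UPGRADE", ('upgrade', 'security', 'patch', 'fix', 'vulnerability')),
--     ("ECONOMIC_PARAMETER", ('parameter', 'inflation', 'fee', 'reward', 'tax', 'burn')),
--     ("GOVERNANCE_CHANGE", ('governance', 'voting', 'quorum', 'threshold', 'proposal')),
--     ("COMMUNITY_FUNDING", ('community', 'pool', 'fund', 'grant', 'spend')),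
--     ("VALIDATOR_STAKING", ('validator', 'staking', 'delegation', 'slash', 'jail')),
--     ("INTEROPERABILITY", ('ibc', 'interchain', 'bridge', 'cross-chain')),
--     ("SMART_CONTRACT", ('contract', 'cosmwasm', 'wasm', 'smart')),
-- ]
--
-- # flat keyword -> (priority rank, label) map, built once
-- KEYWORD_RANK = {kw: (rank, label)
--                 for rank, (label, kws) in enumerate(_GROUPS)
--                 for kw in kws}
--
--
-- def _categorize_proposal(title: str, description: str, proposal_type: str) -> str:
--     """Categorize by the minimum-rank keyword occurring in the title.
--
--     Instead of an early-return chain of grouped checks, scan the flat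
--     keyword->(rank,label) map once, keeping the best (lowest) rank seen;
--     the minimum rank is exactly the first group with a match.
--     """
--     title_lower = title.lower()
--     description_lower = description.lower()  # kept: A computes it too (unused)
--     best = None
--     for kw, (rank, label) in KEYWORD_RANK.items():
--         if kw in title_lower and (best is None or rank < best[0]):
--             best = (rank, label)
--     return best[1] if best is not None else "GENERAL_GOVERNANCE"
-- ===== Notes on version B (the rewrite author's own statement) =====
-- stated objective: alternative
-- what changed: Replaces the early-return chain of seven grouped any() checks by an exhaustive min-rank fold over a flat keyword->(rank,label) map: every keyword is tested and the lowest-rank match wins, which equals the first matching group.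
import Mathlib
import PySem

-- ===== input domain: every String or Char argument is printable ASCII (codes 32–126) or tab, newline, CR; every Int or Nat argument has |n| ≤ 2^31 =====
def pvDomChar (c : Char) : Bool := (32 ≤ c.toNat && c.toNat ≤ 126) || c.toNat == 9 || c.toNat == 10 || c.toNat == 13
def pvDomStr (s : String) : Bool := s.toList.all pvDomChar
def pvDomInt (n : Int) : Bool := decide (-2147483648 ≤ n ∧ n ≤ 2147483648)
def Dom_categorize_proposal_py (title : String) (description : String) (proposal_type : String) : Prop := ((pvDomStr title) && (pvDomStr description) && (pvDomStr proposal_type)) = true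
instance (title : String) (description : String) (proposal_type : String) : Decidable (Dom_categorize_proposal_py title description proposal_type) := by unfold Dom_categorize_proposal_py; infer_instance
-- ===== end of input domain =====

-- B replaces A's early-return chain of grouped any() checks by an exhaustive min-rank fold over a flat keyword->(rank,label) map; objective: alternative.


-- ===== PORT A =====
-- A: chain of seven keyword-group checks on title.lower(); description.lower() is computed and unused (as in the Python).
def categorize_proposal_py (title : String) (description : String) (proposal_type : String) : String :=
  let title_lower := PySem.Str.lower title
  let _description_lower := PySem.Str.lower description
  if (["upgrade", "security", "patch", "fix", "vulnerability"] : List String).any (fun k => PySem.Str.isIn k title_lower) then "SECURITY_UPGRADE"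
  else if (["parameter", "inflation", "fee", "reward", "tax", "burn"] : List String).any (fun k => PySem.Str.isIn k title_lower) then "ECONOMIC_PARAMETER"
  else if (["governance", "voting", "quorum", "threshold", "proposal"] : List String).any (fun k => PySem.Str.isIn k title_lower) then "GOVERNANCE_CHANGE"
  else if (["community", "pool", "fund", "grant", "spend"] : List String).any (fun k => PySem.Str.isIn k title_lower) then "COMMUNITY_FUNDING"
  else if (["validator", "staking", "delegation", "slash", "jail"] : List String).any (fun k => PySem.Str.isIn k title_lower) then "VALIDATOR_STAKING"
  else if (["ibc", "interchain", "bridge", "cross-chain"] : List String).any (fun k => PySem.Str.isIn k title_lower) then "INTEROPERABILITY"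
  else if (["contract", "cosmwasm", "wasm", "smart"] : List String).any (fun k => PySem.Str.isIn k title_lower) then "SMART_CONTRACT"
  else "GENERAL_GOVERNANCE"

-- ===== PORT B =====
-- B: the flat KEYWORD_RANK map (dict in insertion order = association list), keyword -> (rank, label)
def pvKeywordRank : List (String × Int × String) :=
  [("upgrade", 0, "SECURITY_UPGRADE"), ("security", 0, "SECURITY_UPGRADE"), ("patch", 0, "SECURITY_UPGRADE"), ("fix", 0, "SECURITY_UPGRADE"), ("vulnerability", 0, "SECURITY_UPGRADE"),
   ("parameter", 1, "ECONOMIC_PARAMETER"), ("inflation", 1, "ECONOMIC_PARAMETER"), ("fee", 1, "ECONOMIC_PARAMETER"), ("reward", 1, "ECONOMIC_PARAMETER"), ("tax", 1, "ECONOMIC_PARAMETER"), ("burn", 1, "ECONOMIC_PARAMETER"),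
   ("governance", 2, "GOVERNANCE_CHANGE"), ("voting", 2, "GOVERNANCE_CHANGE"), ("quorum", 2, "GOVERNANCE_CHANGE"), ("threshold", 2, "GOVERNANCE_CHANGE"), ("proposal", 2, "GOVERNANCE_CHANGE"),
   ("community", 3, "COMMUNITY_FUNDING"), ("pool", 3, "COMMUNITY_FUNDING"), ("fund", 3, "COMMUNITY_FUNDING"), ("grant", 3, "COMMUNITY_FUNDING"), ("spend", 3, "COMMUNITY_FUNDING"),
   ("validator", 4, "VALIDATOR_STAKING"), ("staking", 4, "VALIDATOR_STAKING"), ("delegation", 4, "VALIDATOR_STAKING"), ("slash", 4, "VALIDATOR_STAKING"), ("jail", 4, "VALIDATOR_STAKING"),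
   ("ibc", 5, "INTEROPERABILITY"), ("interchain", 5, "INTEROPERABILITY"), ("bridge", 5, "INTEROPERABILITY"), ("cross-chain", 5, "INTEROPERABILITY"),
   ("contract", 6, "SMART_CONTRACT"), ("cosmwasm", 6, "SMART_CONTRACT"), ("wasm", 6, "SMART_CONTRACT"), ("smart", 6, "SMART_CONTRACT")]

-- the loop body: 'if kw in title_lower and (best is None or rank < best[0]): best = (rank, label)'
def pvStep (title_lower : String) (best : Option (Int × String)) (e : String × Int × String) : Option (Int × String) :=
  if PySem.Str.isIn e.1 title_lower && (match best with | none => true | some (r, _) => decide (e.2.1 < r)) then some e.2 else best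

def categorize_proposal_py_alt (title : String) (description : String) (proposal_type : String) : String :=
  let title_lower := PySem.Str.lower title
  let _description_lower := PySem.Str.lower description
  match pvKeywordRank.foldl (pvStep title_lower) none with
  | some (_, label) => label
  | none => "GENERAL_GOVERNANCE"

-- ===== PRECONDITION & SPEC =====
def Spec_categorize_proposal_py (title : String) (description : String) (proposal_type : String) (out : String) : Prop := out = categorize_proposal_py_alt title description proposal_type
instance (title : String) (description : String) (proposal_type : String) (out : String) : Decidable (Spec_categorize_proposal_py title description proposal_type out) := by unfold Spec_categorize_proposal_py; infer_instance

-- ===== CLAIM (what is proved, stated in full; the proofs are below) =====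
def Claim_equal_categorize_proposal_py : Prop := ∀ (title : String) (description : String) (proposal_type : String), Dom_categorize_proposal_py title description proposal_type → Spec_categorize_proposal_py title description proposal_type (categorize_proposal_py title description proposal_type)

-- ===== LEMMAS AND PROOFS =====

-- a group of keywords sharing one rank and label, as it appears inside pvKeywordRank
def pvGroup (kws : List String) (r : Int) (l : String) : List (String × Int × String) :=
  kws.map (fun k => (k, r, l))

-- once best is set at rank r', entries of rank ≥ r' never replace it
theorem pvFold_ge (t : String) (r' : Int) (l' : String) :
    ∀ (L : List (String × Int × String)), (∀ e ∈ L, r' ≤ e.2.1) →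
      L.foldl (pvStep t) (some (r', l')) = some (r', l')
  | [], _ => rfl
  | e :: L, h => by
    have h1 : r' ≤ e.2.1 := h e (List.mem_cons_self ..)
    have hstep : pvStep t (some (r', l')) e = some (r', l') := by
      simp [pvStep, not_lt.mpr h1]
    rw [List.foldl_cons, hstep]
    exact pvFold_ge t r' l' L (fun e' he' => h e' (List.mem_cons_of_mem _ he'))

-- a group of rank ≥ the current best never replaces it
theorem pvFold_group_some (t : String) (kws : List String) (r : Int) (l : String)
    (r' : Int) (l' : String) (h : r' ≤ r) :
    (pvGroup kws r l).foldl (pvStep t) (some (r', l')) = some (r', l') := by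
  apply pvFold_ge
  intro e he
  simp only [pvGroup, List.mem_map] at he
  obtain ⟨_, _, rfl⟩ := he
  exact h

-- folding a single-rank group from 'none' yields the group's entry iff any keyword matches
theorem pvFold_group_none (t : String) (r : Int) (l : String) :
    ∀ (kws : List String),
      (pvGroup kws r l).foldl (pvStep t) none
        = if kws.any (fun k => PySem.Str.isIn k t) then some (r, l) else none
  | [] => rfl
  | k :: kws => by
    have hcons : pvGroup (k :: kws) r l = (k, r, l) :: pvGroup kws r l := rfl
    rw [hcons, List.foldl_cons, List.any_cons]
    by_cases hk : PySem.Str.isIn k t = true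
    · have hstep : pvStep t none (k, r, l) = some (r, l) := by
        unfold pvStep; rw [hk]; rfl
      rw [hstep, pvFold_group_some t kws r l r l (le_refl r), if_pos (by rw [hk]; rfl)]
    · have hk' : PySem.Str.isIn k t = false := by simpa using hk
      have hstep : pvStep t none (k, r, l) = none := by
        unfold pvStep; rw [hk']; rfl
      rw [hstep, pvFold_group_none t r l kws]
      simp only [hk', Bool.false_or]

-- pvKeywordRank is the concatenation of the seven single-rank groups
theorem pvKeywordRank_eq :
    pvKeywordRank =
      pvGroup ["upgrade", "security", "patch", "fix", "vulnerability"] 0 "SECURITY_UPGRADE"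
      ++ pvGroup ["parameter", "inflation", "fee", "reward", "tax", "burn"] 1 "ECONOMIC_PARAMETER"
      ++ pvGroup ["governance", "voting", "quorum", "threshold", "proposal"] 2 "GOVERNANCE_CHANGE"
      ++ pvGroup ["community", "pool", "fund", "grant", "spend"] 3 "COMMUNITY_FUNDING"
      ++ pvGroup ["validator", "staking", "delegation", "slash", "jail"] 4 "VALIDATOR_STAKING"
      ++ pvGroup ["ibc", "interchain", "bridge", "cross-chain"] 5 "INTEROPERABILITY"
      ++ pvGroup ["contract", "cosmwasm", "wasm", "smart"] 6 "SMART_CONTRACT" := by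
  rfl

-- ===== VERDICT (by name: the statement is the Claim_ definition above) =====
theorem categorize_proposal_py_spec : Claim_equal_categorize_proposal_py := by
  intro title description proposal_type _
  show categorize_proposal_py title description proposal_type
      = categorize_proposal_py_alt title description proposal_type
  simp only [categorize_proposal_py, categorize_proposal_py_alt]
  rw [pvKeywordRank_eq]
  simp only [List.foldl_append]
  set t := PySem.Str.lower title with ht
  by_cases h1 : (["upgrade", "security", "patch", "fix", "vulnerability"] : List String).any (fun k => PySem.Str.isIn k t) = true
  · rw [pvFold_group_none]
    simp only [if_pos h1]
    rw [pvFold_group_some t ["parameter", "inflation", "fee", "reward", "tax", "burn"] 1 "ECONOMIC_PARAMETER" 0 "SECURITY_UPGRADE" (by norm_num)]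
    rw [pvFold_group_some t ["governance", "voting", "quorum", "threshold", "proposal"] 2 "GOVERNANCE_CHANGE" 0 "SECURITY_UPGRADE" (by norm_num)]
    rw [pvFold_group_some t ["community", "pool", "fund", "grant", "spend"] 3 "COMMUNITY_FUNDING" 0 "SECURITY_UPGRADE" (by norm_num)]
    rw [pvFold_group_some t ["validator", "staking", "delegation", "slash", "jail"] 4 "VALIDATOR_STAKING" 0 "SECURITY_UPGRADE" (by norm_num)]
    rw [pvFold_group_some t ["ibc", "interchain", "bridge", "cross-chain"] 5 "INTEROPERABILITY" 0 "SECURITY_UPGRADE" (by norm_num)]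
    rw [pvFold_group_some t ["contract", "cosmwasm", "wasm", "smart"] 6 "SMART_CONTRACT" 0 "SECURITY_UPGRADE" (by norm_num)]
  · rw [pvFold_group_none]
    simp only [if_neg h1]
    by_cases h2 : (["parameter", "inflation", "fee", "reward", "tax", "burn"] : List String).any (fun k => PySem.Str.isIn k t) = true
    · rw [pvFold_group_none]
      simp only [if_pos h2]
      rw [pvFold_group_some t ["governance", "voting", "quorum", "threshold", "proposal"] 2 "GOVERNANCE_CHANGE" 1 "ECONOMIC_PARAMETER" (by norm_num)]
      rw [pvFold_group_some t ["community", "pool", "fund", "grant", "spend"] 3 "COMMUNITY_FUNDING" 1 "ECONOMIC_PARAMETER" (by norm_num)]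
      rw [pvFold_group_some t ["validator", "staking", "delegation", "slash", "jail"] 4 "VALIDATOR_STAKING" 1 "ECONOMIC_PARAMETER" (by norm_num)]
      rw [pvFold_group_some t ["ibc", "interchain", "bridge", "cross-chain"] 5 "INTEROPERABILITY" 1 "ECONOMIC_PARAMETER" (by norm_num)]
      rw [pvFold_group_some t ["contract", "cosmwasm", "wasm", "smart"] 6 "SMART_CONTRACT" 1 "ECONOMIC_PARAMETER" (by norm_num)]
    · rw [pvFold_group_none]
      simp only [if_neg h2]
      by_cases h3 : (["governance", "voting", "quorum", "threshold", "proposal"] : List String).any (fun k => PySem.Str.isIn k t) = true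
      · rw [pvFold_group_none]
        simp only [if_pos h3]
        rw [pvFold_group_some t ["community", "pool", "fund", "grant", "spend"] 3 "COMMUNITY_FUNDING" 2 "GOVERNANCE_CHANGE" (by norm_num)]
        rw [pvFold_group_some t ["validator", "staking", "delegation", "slash", "jail"] 4 "VALIDATOR_STAKING" 2 "GOVERNANCE_CHANGE" (by norm_num)]
        rw [pvFold_group_some t ["ibc", "interchain", "bridge", "cross-chain"] 5 "INTEROPERABILITY" 2 "GOVERNANCE_CHANGE" (by norm_num)]
        rw [pvFold_group_some t ["contract", "cosmwasm", "wasm", "smart"] 6 "SMART_CONTRACT" 2 "GOVERNANCE_CHANGE" (by norm_num)]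
      · rw [pvFold_group_none]
        simp only [if_neg h3]
        by_cases h4 : (["community", "pool", "fund", "grant", "spend"] : List String).any (fun k => PySem.Str.isIn k t) = true
        · rw [pvFold_group_none]
          simp only [if_pos h4]
          rw [pvFold_group_some t ["validator", "staking", "delegation", "slash", "jail"] 4 "VALIDATOR_STAKING" 3 "COMMUNITY_FUNDING" (by norm_num)]
          rw [pvFold_group_some t ["ibc", "interchain", "bridge", "cross-chain"] 5 "INTEROPERABILITY" 3 "COMMUNITY_FUNDING" (by norm_num)]
          rw [pvFold_group_some t ["contract", "cosmwasm", "wasm", "smart"] 6 "SMART_CONTRACT" 3 "COMMUNITY_FUNDING" (by norm_num)]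
        · rw [pvFold_group_none]
          simp only [if_neg h4]
          by_cases h5 : (["validator", "staking", "delegation", "slash", "jail"] : List String).any (fun k => PySem.Str.isIn k t) = true
          · rw [pvFold_group_none]
            simp only [if_pos h5]
            rw [pvFold_group_some t ["ibc", "interchain", "bridge", "cross-chain"] 5 "INTEROPERABILITY" 4 "VALIDATOR_STAKING" (by norm_num)]
            rw [pvFold_group_some t ["contract", "cosmwasm", "wasm", "smart"] 6 "SMART_CONTRACT" 4 "VALIDATOR_STAKING" (by norm_num)]
          · rw [pvFold_group_none]
            simp only [if_neg h5]
            by_cases h6 : (["ibc", "interchain", "bridge", "cross-chain"] : List String).any (fun k => PySem.Str.isIn k t) = true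
            · rw [pvFold_group_none]
              simp only [if_pos h6]
              rw [pvFold_group_some t ["contract", "cosmwasm", "wasm", "smart"] 6 "SMART_CONTRACT" 5 "INTEROPERABILITY" (by norm_num)]
            · rw [pvFold_group_none]
              simp only [if_neg h6]
              by_cases h7 : (["contract", "cosmwasm", "wasm", "smart"] : List String).any (fun k => PySem.Str.isIn k t) = true
              · rw [pvFold_group_none]
                simp only [if_pos h7]
              · rw [pvFold_group_none]
                simp only [if_neg h7]
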